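-- pv_equiv track=rewrite | github.com/jarodsim/Grafos-Euler-Hierholzer | hierholzer.py | stringfy_edges
-- ===== SOURCE A (Python) =====
-- def stringfy_edges(edges):
--     string = ""
--
--     for i, edge in enumerate(edges):
--         if edges[i - 1][1] is not None and edge[0] != edges[i - 1][1] or i == 0:
--             string += f"{edge[0]} -> {edge[1]}"
--         else:
--             string += f" -> {edge[1]}"
--
--     return string
-- ===== SOURCE B (Python) =====
-- def stringfy_edges(edges):
--     # Two-phase: partition edges into chains of vertices, then format each chain.
--     chains = []
--     for a, b in edges:
--         if chains and (chains[-1][-1] is None or a == chains[-1][-1]):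
--             chains[-1].append(b)
--         else:
--             chains.append([a, b])
--     return "".join(" -> ".join(str(v) for v in chain) for chain in chains)
-- ===== Notes on version B (the rewrite author's own statement) =====
-- stated objective: alternative
-- what changed: B replaces A's single indexed loop that appends formatted fragments to one flat string (consulting edges[i-1] each step) with two phases: first partition the edges into chains of vertices tracked via the last vertex of the last chain, then format each chain with ' -> '.join and concatenate.
import Mathlib
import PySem

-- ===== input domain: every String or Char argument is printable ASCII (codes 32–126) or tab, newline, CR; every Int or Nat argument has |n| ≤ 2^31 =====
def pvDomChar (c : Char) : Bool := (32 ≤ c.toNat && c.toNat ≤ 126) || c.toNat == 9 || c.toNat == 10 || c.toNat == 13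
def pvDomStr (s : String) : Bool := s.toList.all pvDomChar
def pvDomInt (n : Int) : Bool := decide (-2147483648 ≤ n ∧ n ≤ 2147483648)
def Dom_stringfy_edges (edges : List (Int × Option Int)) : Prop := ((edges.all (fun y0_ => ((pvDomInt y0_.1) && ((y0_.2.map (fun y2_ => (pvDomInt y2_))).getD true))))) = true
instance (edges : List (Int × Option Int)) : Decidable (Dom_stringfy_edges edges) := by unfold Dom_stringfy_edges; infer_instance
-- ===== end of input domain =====

-- B restructures A's single flat string-accumulating loop into two phases (build chains of vertices, then format them); same cost, a clearer decomposition.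

-- ===== PORT A =====
-- str(v) for an int-or-None value (Python's f"{edge[1]}" renders None as "None")
def pyShowOpt (o : Option Int) : String :=
  match o with
  | none => "None"
  | some n => PySem.Int.toStr n

-- the body of A's `for i, edge in enumerate(edges)` loop, as index recursion over i with the string accumulator
def stringfyA_go (edges : List (Int × Option Int)) (i : Nat) (s : String) : String :=
  if h : i < edges.length then
    let edge := edges[i]
    -- edges[i - 1]: Python wraps to the last edge when i == 0 (the list is nonempty inside the loop, so pyGet? returns a value)
    let prev := (PySem.List.pyGet? edges ((i : Int) - 1)).getD (0, none)
    let s' :=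
      if (prev.2.elim false (fun p => decide (edge.1 ≠ p))) || (i == 0) then
        s ++ (PySem.Int.toStr edge.1 ++ " -> " ++ pyShowOpt edge.2)
      else
        s ++ (" -> " ++ pyShowOpt edge.2)
    stringfyA_go edges (i + 1) s'
  else s
termination_by edges.length - i

def stringfy_edges (edges : List (Int × Option Int)) : String :=
  stringfyA_go edges 0 ""

-- ===== PORT B =====
-- chains[-1].append(b): append b to the last chain
def pushLast (chains : List (List (Option Int))) (b : Option Int) : List (List (Option Int)) :=
  match chains with
  | [] => []
  | [c] => [c ++ [b]]
  | c :: rest => c :: pushLast rest b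

-- chains[-1][-1] (none when there is no last chain: the `chains and …` guard)
def lastLast (chains : List (List (Option Int))) : Option (Option Int) :=
  (chains.getLast?).bind List.getLast?

-- one iteration of B's partitioning loop
def bStep (chains : List (List (Option Int))) (e : Int × Option Int) : List (List (Option Int)) :=
  match lastLast chains with
  | some none => pushLast chains e.2
  | some (some p) => if e.1 = p then pushLast chains e.2 else chains ++ [[some e.1, e.2]]
  | none => chains ++ [[some e.1, e.2]]

-- " -> ".join(str(v) for v in chain)
def fmtChain (c : List (Option Int)) : String :=
  PySem.Str.join " -> " (c.map pyShowOpt)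

def stringfy_edges_alt (edges : List (Int × Option Int)) : String :=
  let chains := edges.foldl bStep []
  PySem.Str.join "" (chains.map fmtChain)

-- ===== PRECONDITION & SPEC =====
def Spec_stringfy_edges (edges : List (Int × Option Int)) (out : String) : Prop := out = stringfy_edges_alt edges
instance (edges : List (Int × Option Int)) (out : String) : Decidable (Spec_stringfy_edges edges out) := by unfold Spec_stringfy_edges; infer_instance

-- ===== CLAIM (what is proved, stated in full; the proofs are below) =====
def Claim_equal_stringfy_edges : Prop := ∀ (edges : List (Int × Option Int)), Dom_stringfy_edges edges → Spec_stringfy_edges edges (stringfy_edges edges)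

-- ===== LEMMAS AND PROOFS =====

-- common reference shape: the output suffix contributed by the remaining edges l, given the previous edge's second component p
def contFn (p : Option Int) (l : List (Int × Option Int)) : String :=
  match l with
  | [] => ""
  | e :: rest =>
    (if p.elim false (fun q => decide (e.1 ≠ q)) then
        PySem.Int.toStr e.1 ++ " -> " ++ pyShowOpt e.2
      else
        " -> " ++ pyShowOpt e.2) ++ contFn e.2 rest

def goFn (l : List (Int × Option Int)) : String :=
  match l with
  | [] => ""
  | e :: rest => (PySem.Int.toStr e.1 ++ " -> " ++ pyShowOpt e.2) ++ contFn e.2 rest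

-- ---- String.join bridge facts (via PySem.Chars.join_*) ----

theorem strJoin_nil (sep : String) : PySem.Str.join sep [] = "" := by
  apply String.toList_inj.mp
  simp [PySem.Str.toList_join, PySem.Chars.join_nil]

theorem strJoin_singleton (sep a : String) : PySem.Str.join sep [a] = a := by
  apply String.toList_inj.mp
  simp [PySem.Str.toList_join, PySem.Chars.join_singleton]

theorem strJoin_cons_cons (sep a b : String) (t : List String) :
    PySem.Str.join sep (a :: b :: t) = a ++ sep ++ PySem.Str.join sep (b :: t) := by
  apply String.toList_inj.mp
  simp [PySem.Str.toList_join, PySem.Chars.join_cons_cons]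

theorem strJoin_append_singleton (sep x : String) :
    ∀ (xs : List String), xs ≠ [] →
      PySem.Str.join sep (xs ++ [x]) = PySem.Str.join sep xs ++ sep ++ x := by
  intro xs
  induction xs with
  | nil => intro h; exact absurd rfl h
  | cons a t ih =>
    intro _
    cases t with
    | nil => simp [strJoin_cons_cons, strJoin_singleton]
    | cons b t' =>
      have : (a :: b :: t') ++ [x] = a :: b :: (t' ++ [x]) := by simp
      rw [this, strJoin_cons_cons, strJoin_cons_cons]
      have h2 : (b :: t') ++ [x] = b :: (t' ++ [x]) := by simp
      rw [← h2, ih (by simp)]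
      simp [String.append_assoc]

theorem strJoinE_append_singleton (x : String) (xs : List String) :
    PySem.Str.join "" (xs ++ [x]) = PySem.Str.join "" xs ++ x := by
  cases xs with
  | nil => simp [strJoin_nil, strJoin_singleton, String.empty_append]
  | cons a t =>
    rw [strJoin_append_singleton "" x (a :: t) (by simp), String.append_empty]

-- ---- A side ----

theorem stringfyA_go_suffix (l2 : List (Int × Option Int)) :
    ∀ (l1 : List (Int × Option Int)) (p : Int × Option Int) (s : String),
      stringfyA_go (l1 ++ p :: l2) (l1.length + 1) s = s ++ contFn p.2 l2 := by
  induction l2 with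
  | nil =>
    intro l1 p s
    rw [stringfyA_go, dif_neg (by simp)]
    simp [contFn, String.append_empty]
  | cons e rest ih =>
    intro l1 p s
    rw [stringfyA_go]
    have hlt : l1.length + 1 < (l1 ++ p :: e :: rest).length := by simp
    rw [dif_pos hlt]
    have hget : (l1 ++ p :: e :: rest)[l1.length + 1]'hlt = e := by
      rw [List.getElem_append_right (by omega)]
      simp
    have hprev : PySem.List.pyGet? (l1 ++ p :: e :: rest) ((↑(l1.length + 1) : Int) - 1)
        = some p := by
      have hc : ((↑(l1.length + 1) : Int) - 1) = ((l1.length : Nat) : Int) := by push_cast; ring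
      rw [hc, PySem.List.pyGet?_ofNat _ _ (by simp)]
      congr 1
      rw [List.getElem_append_right (by omega)]
      simp
    have hrec := ih (l1 ++ [p]) e
    simp only [List.length_append, List.length_cons, List.length_nil, List.append_assoc,
      List.cons_append, List.nil_append, Nat.zero_add] at hrec
    simp only [hget, hprev, Option.getD_some]
    rw [hrec]
    cases hp : p.2 with
    | none => simp [contFn, String.append_assoc]
    | some q =>
      by_cases he : e.1 = q
      · simp [contFn, he, String.append_assoc]
      · simp [contFn, he, String.append_assoc]

theorem stringfyA_eq_goFn (edges : List (Int × Option Int)) :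
    stringfy_edges edges = goFn edges := by
  cases edges with
  | nil =>
    rw [stringfy_edges, stringfyA_go]
    simp [goFn]
  | cons e rest =>
    rw [stringfy_edges, stringfyA_go]
    have hlt : 0 < (e :: rest).length := by simp
    rw [dif_pos hlt]
    simp only [List.getElem_cons_zero, Bool.or_true, beq_self_eq_true, if_true]
    have hrec := stringfyA_go_suffix rest [] e
    simp only [List.length_nil, List.nil_append, Nat.zero_add] at hrec
    rw [hrec]
    simp [goFn, String.empty_append]

-- ---- B side ----

theorem fmtChain_append (c : List (Option Int)) (b : Option Int) (hc : c ≠ []) :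
    fmtChain (c ++ [b]) = fmtChain c ++ " -> " ++ pyShowOpt b := by
  unfold fmtChain
  rw [List.map_append, List.map_singleton]
  exact strJoin_append_singleton _ _ _ (by simpa using hc)

theorem pushLast_eq (b : Option Int) :
    ∀ (cs : List (List (Option Int))) (c : List (Option Int)), cs.getLast? = some c →
      pushLast cs b = cs.dropLast ++ [c ++ [b]] := by
  intro cs
  induction cs with
  | nil => intro c h; simp at h
  | cons c' t ih =>
    intro c h
    cases t with
    | nil =>
      simp only [List.getLast?_singleton, Option.some_inj] at h
      subst h
      simp [pushLast]
    | cons c'' t' =>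
      have h' : (c'' :: t').getLast? = some c := by
        rw [← h, List.getLast?_cons_cons]
      rw [show pushLast (c' :: c'' :: t') b = c' :: pushLast (c'' :: t') b from rfl,
          ih c h', List.dropLast_cons₂]
      simp

theorem lastLast_append_new (cs : List (List (Option Int))) (a : Int) (b : Option Int) :
    lastLast (cs ++ [[some a, b]]) = some b := by
  simp [lastLast]

theorem lastLast_pushLast (cs : List (List (Option Int))) (c : List (Option Int)) (b : Option Int)
    (h : cs.getLast? = some c) : lastLast (pushLast cs b) = some b := by
  rw [pushLast_eq b cs c h]
  simp [lastLast]

theorem join_append_new (cs : List (List (Option Int))) (a : Int) (b : Option Int) :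
    PySem.Str.join "" ((cs ++ [[some a, b]]).map fmtChain)
      = PySem.Str.join "" (cs.map fmtChain)
        ++ (PySem.Int.toStr a ++ " -> " ++ pyShowOpt b) := by
  rw [List.map_append, List.map_singleton, strJoinE_append_singleton]
  have : fmtChain [some a, b] = PySem.Int.toStr a ++ " -> " ++ pyShowOpt b := by
    unfold fmtChain
    rw [List.map_cons, List.map_singleton, strJoin_cons_cons, strJoin_singleton]
    rfl
  rw [this]

theorem join_pushLast (cs : List (List (Option Int))) (c : List (Option Int)) (b : Option Int)
    (h : cs.getLast? = some c) (hc : c ≠ []) :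
    PySem.Str.join "" ((pushLast cs b).map fmtChain)
      = PySem.Str.join "" (cs.map fmtChain) ++ (" -> " ++ pyShowOpt b) := by
  rw [pushLast_eq b cs c h]
  have hcs : cs = cs.dropLast ++ [c] := by
    conv_lhs => rw [← List.dropLast_append_getLast? c h]
  conv_rhs => rw [hcs]
  rw [List.map_append, List.map_singleton, strJoinE_append_singleton,
      List.map_append, List.map_singleton, strJoinE_append_singleton,
      fmtChain_append c b hc]
  simp [String.append_assoc]

theorem bFold_suffix (l : List (Int × Option Int)) :
    ∀ (cs : List (List (Option Int))) (p : Option Int),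
      lastLast cs = some p →
      PySem.Str.join "" ((l.foldl bStep cs).map fmtChain)
        = PySem.Str.join "" (cs.map fmtChain) ++ contFn p l := by
  induction l with
  | nil =>
    intro cs p _
    simp [contFn, String.append_empty]
  | cons e rest ih =>
    intro cs p h
    obtain ⟨c, hc, hcl⟩ : ∃ c, cs.getLast? = some c ∧ c.getLast? = some p := by
      unfold lastLast at h
      cases hg : cs.getLast? with
      | none => rw [hg] at h; simp at h
      | some c => rw [hg] at h; exact ⟨c, rfl, h⟩
    have hcne : c ≠ [] := by intro hn; subst hn; simp at hcl
    rw [List.foldl_cons]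
    cases p with
    | none =>
      have hb : bStep cs e = pushLast cs e.2 := by
        unfold bStep; rw [h]
      rw [hb, ih _ e.2 (lastLast_pushLast cs c e.2 hc), join_pushLast cs c e.2 hc hcne]
      simp [contFn, String.append_assoc]
    | some q =>
      have hb : bStep cs e = if e.1 = q then pushLast cs e.2 else cs ++ [[some e.1, e.2]] := by
        unfold bStep; rw [h]
      by_cases he : e.1 = q
      · rw [hb, if_pos he, ih _ e.2 (lastLast_pushLast cs c e.2 hc),
            join_pushLast cs c e.2 hc hcne]
        simp [contFn, he, String.append_assoc]
      · rw [hb, if_neg he, ih _ e.2 (lastLast_append_new cs e.1 e.2), join_append_new]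
        simp [contFn, he, String.append_assoc]

theorem stringfy_alt_eq_goFn (edges : List (Int × Option Int)) :
    stringfy_edges_alt edges = goFn edges := by
  cases edges with
  | nil =>
    rw [stringfy_edges_alt]
    simp [goFn, strJoin_nil]
  | cons e rest =>
    rw [stringfy_edges_alt]
    simp only [List.foldl_cons]
    have hb : bStep [] e = [[some e.1, e.2]] := by
      unfold bStep lastLast; rfl
    rw [hb, bFold_suffix rest [[some e.1, e.2]] e.2 (by simp [lastLast])]
    have : PySem.Str.join "" ([[some e.1, e.2]].map fmtChain)
        = PySem.Int.toStr e.1 ++ " -> " ++ pyShowOpt e.2 := by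
      rw [List.map_singleton, strJoin_singleton]
      unfold fmtChain
      rw [List.map_cons, List.map_singleton, strJoin_cons_cons, strJoin_singleton]
      rfl
    rw [this, goFn]

-- ===== VERDICT (by name: the statement is the Claim_ definition above) =====
theorem stringfy_edges_spec : Claim_equal_stringfy_edges := by
  intro edges _
  unfold Spec_stringfy_edges
  rw [stringfy_alt_eq_goFn, stringfyA_eq_goFn]
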